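-- pv_equiv track=rewrite | github.com/Snowyq/prg-basics | 04-Functions/functions-6.12.py | make_asterisks
-- ===== SOURCE A (Python) =====
-- def make_asterisks(num):
--   output = ''
--   for i in range (0, num):
--     if i == 0:
--       output += '*'
--     else:
--       output += '/*'
--   return output
-- ===== SOURCE B (Python) =====
-- def make_asterisks(num):
--   return '' if num <= 0 else '*' + '/*' * (num - 1)
-- ===== Notes on version B (the rewrite author's own statement) =====
-- stated objective: simpler
-- what changed: Replaces the per-index loop with a per-iteration branch by a single closed-form string-repetition expression '*' + '/*' * (num - 1) guarded for num <= 0; avoids repeated string concatenation.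
import Mathlib
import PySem

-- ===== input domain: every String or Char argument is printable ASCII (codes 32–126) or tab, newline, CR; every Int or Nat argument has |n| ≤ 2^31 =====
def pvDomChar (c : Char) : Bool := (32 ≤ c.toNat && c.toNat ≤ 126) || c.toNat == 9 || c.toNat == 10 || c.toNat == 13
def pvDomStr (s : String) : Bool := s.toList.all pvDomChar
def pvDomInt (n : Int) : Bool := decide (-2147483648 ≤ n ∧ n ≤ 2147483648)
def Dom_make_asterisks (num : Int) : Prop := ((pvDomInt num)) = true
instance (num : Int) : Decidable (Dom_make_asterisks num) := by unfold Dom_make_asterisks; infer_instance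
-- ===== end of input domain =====

-- B replaces A's per-index loop by the closed form '' if num <= 0 else '*' + '/*' * (num - 1) (objective: simpler).


-- ===== PORT A =====
-- the string accumulator is ported through List Char (String.append is opaque to the kernel)
def make_asterisks (num : Int) : String :=
  String.mk ((PySem.List.pyRange 0 num 1).foldl
    (fun output i => if i == 0 then output ++ ['*'] else output ++ ['/', '*']) [])

-- ===== PORT B =====
def make_asterisks_alt (num : Int) : String :=
  if num ≤ 0 then "" else String.mk ('*' :: PySem.List.pyRepeat ['/', '*'] (num - 1))

-- ===== PRECONDITION & SPEC =====
def Spec_make_asterisks (num : Int) (out : String) : Prop := out = make_asterisks_alt num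
instance (num : Int) (out : String) : Decidable (Spec_make_asterisks num out) := by unfold Spec_make_asterisks; infer_instance

-- ===== CLAIM (what is proved, stated in full; the proofs are below) =====
def Claim_equal_make_asterisks : Prop := ∀ (num : Int), Dom_make_asterisks num → Spec_make_asterisks num (make_asterisks num)

-- ===== LEMMAS AND PROOFS =====

-- A's loop from index a ≥ 1 only ever takes the '/*' branch
theorem pv_tail_loop (m : Nat) : ∀ (a : Int) (acc : List Char), 1 ≤ a →
    (PySem.List.pyRange a (a + m) 1).foldl
      (fun output i => if i == 0 then output ++ ['*'] else output ++ ['/', '*']) acc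
    = acc ++ (List.replicate m ['/', '*']).flatten := by
  induction m with
  | zero =>
    intro a acc _
    rw [PySem.List.pyRange_one_eq_nil (by omega)]
    simp
  | succ m ih =>
    intro a acc ha
    rw [PySem.List.pyRange_one_cons (by omega)]
    simp only [List.foldl_cons]
    have hne : (a == 0) = false := by
      simp only [beq_eq_false_iff_ne, ne_eq]
      omega
    rw [hne, if_neg (by simp)]
    rw [show a + ((m + 1 : Nat) : Int) = (a + 1) + (m : Int) from by push_cast; ring]
    rw [ih (a + 1) _ (by omega)]
    simp [List.replicate_succ]

-- ===== VERDICT (by name: the statement is the Claim_ definition above) =====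
theorem make_asterisks_spec : Claim_equal_make_asterisks := by
  intro num _
  unfold Spec_make_asterisks make_asterisks make_asterisks_alt
  by_cases h : num ≤ 0
  · rw [PySem.List.pyRange_one_eq_nil (by omega), if_pos h]
    rfl
  · rw [if_neg h]
    rw [PySem.List.pyRange_one_cons (by omega)]
    simp only [List.foldl_cons, beq_self_eq_true, if_true, List.nil_append]
    have hm : num = 1 + ((num - 1).toNat : Int) := by omega
    have := pv_tail_loop (num - 1).toNat 1 ['*'] (le_refl 1)
    rw [show (1 : Int) + ((num - 1).toNat : Int) = num from hm.symm] at this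
    rw [show (0:Int) + 1 = 1 from by ring, this]
    simp [PySem.List.pyRepeat]
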